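-- pv_equiv track=rewrite | github.com/MaxLarose/k-irreducible-sums---Python-scripts | All_Minimally_k-Irreducible_Sums.py | vector_as_sum
-- ===== SOURCE A (Python) =====
-- def divides(x, y):
--     return y % x == 0
--
-- def proper_divisors(k):
--     # Define D to be an empty list. It will represent the list of all proper divisors
--     # of k.
--     D = []
--     for i in range(1, k):
--         if divides(i, k):
--             D.append(i)
--     return D
--
-- def vector_as_sum(k, x):
--     D = proper_divisors(k)
--     n = len(D)
--     s = ""
--     # Append 'x_id_i + ' to s for all 0 <= i <= n-1.
--     for i in range(0, n):
--         if x[i] != 0: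
--             s = s + str(x[i]) + "*" + str(D[i]) + " + "
--     # Remove the superfluous ' + ' at the end of s
--     s = s[0:len(s) - 3]
--     return s
-- ===== SOURCE B (Python) =====
-- def vector_as_sum(k, x):
--     # Enumerate divisors in O(sqrt(k)): small divisors ascending, cofactors
--     # collected and reversed, then the trivial divisor k itself is dropped.
--     small, large = [], []
--     d = 1
--     while d * d < k:
--         if k % d == 0:
--             small.append(d)
--             large.append(k // d)
--         d += 1
--     if d * d == k:
--         small.append(d)
--     divs = [v for v in small + large[::-1] if v != k]
--     return " + ".join("%d*%d" % (c, v) for c, v in zip(x, divs) if c != 0)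
-- ===== Notes on version B (the rewrite author's own statement) =====
-- stated objective: faster
-- what changed: B enumerates divisors in pairs up to sqrt(k) (collecting cofactors and reversing them to keep ascending order) instead of scanning all of 1..k-1, and builds the string with a single join over zipped nonzero terms instead of concatenating ' + '-terminated pieces and slicing off the trailing separator.
import Mathlib
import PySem

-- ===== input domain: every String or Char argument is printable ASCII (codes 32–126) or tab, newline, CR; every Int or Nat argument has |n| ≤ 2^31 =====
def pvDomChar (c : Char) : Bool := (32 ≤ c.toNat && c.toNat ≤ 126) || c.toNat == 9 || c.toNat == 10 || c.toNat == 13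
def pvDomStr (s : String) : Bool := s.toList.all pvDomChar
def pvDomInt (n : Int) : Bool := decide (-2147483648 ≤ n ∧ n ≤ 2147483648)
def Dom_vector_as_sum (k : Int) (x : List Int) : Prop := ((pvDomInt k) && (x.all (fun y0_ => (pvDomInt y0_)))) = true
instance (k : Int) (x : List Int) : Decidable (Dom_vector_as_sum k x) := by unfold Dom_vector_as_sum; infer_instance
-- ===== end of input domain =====

-- B enumerates divisors in pairs up to sqrt(k) and joins the nonzero terms once,
-- instead of A's scan of all of 1..k-1 plus concatenate-then-strip (objective: faster).

-- ===== PORT A =====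
def divides (x y : Int) : Bool := PySem.Int.mod y x == 0

def proper_divisors (k : Int) : List Int :=
  (PySem.List.pyRange 1 k 1).foldl (fun D i => if divides i k then D ++ [i] else D) []

def vector_as_sum (k : Int) (x : List Int) : String :=
  let D := proper_divisors k
  let n : Int := PySem.List.len D
  let s : List Char :=
    (PySem.List.pyRange 0 n 1).foldl (fun s i =>
      if PySem.List.pyGetD x i 0 ≠ 0 then
        s ++ PySem.Int.toChars (PySem.List.pyGetD x i 0) ++ ['*']
          ++ PySem.Int.toChars (PySem.List.pyGetD D i 0) ++ [' ', '+', ' ']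
      else s) []
  String.ofList (PySem.List.slice s (some 0) (some (PySem.List.len s - 3)))

-- ===== PORT B =====
-- termination helper for the sqrt loop (cited by collectDivs's decreasing_by)
theorem pv_le_mul_self (a : Int) : a ≤ a * a := by
  rcases le_total a 0 with h | h <;> nlinarith

def collectDivs (k d : Int) (small large : List Int) : Int × List Int × List Int :=
  if h : d * d < k then
    if PySem.Int.mod k d == 0 then
      collectDivs k (d + 1) (small ++ [d]) (large ++ [PySem.Int.floordiv k d])
    else collectDivs k (d + 1) small large
  else (d, small, large)
termination_by (k - d).toNat
decreasing_by all_goals (have := pv_le_mul_self d; omega)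

def vector_as_sum_alt (k : Int) (x : List Int) : String :=
  let t := collectDivs k 1 [] []
  let small := if t.1 * t.1 == k then t.2.1 ++ [t.1] else t.2.1
  let divs := (small ++ t.2.2.reverse).filter (fun v => v ≠ k)
  String.ofList (PySem.Chars.join [' ', '+', ' ']
    (((x.zip divs).filter (fun p => p.1 ≠ 0)).map
      (fun p => PySem.Int.toChars p.1 ++ ['*'] ++ PySem.Int.toChars p.2)))

-- ===== PRECONDITION & SPEC =====
-- binary-search integer square root: fuel, k, bracket [lo, hi) with lo*lo ≤ k < hi*hi
def pvSqrtAux : Nat → Int → Int → Int → Int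
  | 0, _, lo, _ => lo
  | fuel + 1, k, lo, hi =>
      if hi ≤ lo + 1 then lo
      else
        let m := PySem.Int.floordiv (lo + hi) 2
        if m * m ≤ k then pvSqrtAux fuel k m hi else pvSqrtAux fuel k lo m

-- integer square root of k (0 for k < 1), exact for k ≤ 2^64

-- integer square root of k (0 for k < 1), exact for k ≤ 2^64
def pvSqrt (k : Int) : Int := if k < 1 then 0 else pvSqrtAux 64 k 1 (k + 1)
def pvNumProper (k : Int) : Int :=
  if k < 1 then 0
  else 2 * ((PySem.List.pyRange 1 (pvSqrt k + 1) 1).countP (fun e => PySem.Int.mod k e == 0) : Int)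
         - (if pvSqrt k * pvSqrt k = k then 1 else 0) - 1

-- Pre_ excludes exactly the inputs where A raises IndexError: x must have at least
-- as many entries as k has proper divisors (counted via divisor pairs below sqrt(k)).
def Pre_vector_as_sum (k : Int) (x : List Int) : Prop :=
  pvNumProper k ≤ (x.length : Int)
instance (k : Int) (x : List Int) : Decidable (Pre_vector_as_sum k x) := by
  unfold Pre_vector_as_sum; infer_instance

def pvWitness_vector_as_sum : Int × List Int := (6, [1, 2, 3])

def Spec_vector_as_sum (k : Int) (x : List Int) (out : String) : Prop := out = vector_as_sum_alt k x
instance (k : Int) (x : List Int) (out : String) : Decidable (Spec_vector_as_sum k x out) := by unfold Spec_vector_as_sum; infer_instance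

-- ===== CLAIM (what is proved, stated in full; the proofs are below) =====
def Claim_equal_vector_as_sum : Prop := ∀ (k : Int) (x : List Int), Dom_vector_as_sum k x → Pre_vector_as_sum k x → Spec_vector_as_sum k x (vector_as_sum k x)

-- ===== LEMMAS AND PROOFS =====
theorem pv_filter_pyRange_nil (p : Int → Bool) (a b : Int)
    (h : ∀ e, a ≤ e → e < b → p e = false) :
    (PySem.List.pyRange a b 1).filter p = [] := by
  rw [List.filter_eq_nil_iff]
  intro e he
  rw [PySem.List.mem_pyRange_one] at he
  simp [h e he.1 he.2]

theorem pv_filter_pyRange_singleton (p : Int → Bool) (a b c : Int)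
    (hac : a ≤ c) (hcb : c < b) (hpc : p c = true)
    (huniq : ∀ e, a ≤ e → e < b → p e = true → e = c) :
    (PySem.List.pyRange a b 1).filter p = [c] := by
  rw [PySem.List.pyRange_one_append a c b hac (le_of_lt hcb),
      PySem.List.pyRange_one_cons hcb, List.filter_append]
  rw [pv_filter_pyRange_nil p a c (fun e h1 h2 => by
    by_contra hb
    have := huniq e h1 (by omega) (by simpa using hb)
    omega)]
  simp only [List.filter_cons, hpc, if_pos]
  rw [pv_filter_pyRange_nil p (c+1) b (fun e h1 h2 => by
    by_contra hb
    have := huniq e (by omega) h2 (by simpa using hb)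
    omega)]
  simp

def pvDivsIn (k lo hi : Int) : List Int :=
  (PySem.List.pyRange lo (hi + 1) 1).filter (fun i => PySem.Int.mod k i == 0)

theorem pv_divsIn_base_gt (k d : Int) (hd : 1 ≤ d) (hgt : k < d * d) :
    pvDivsIn k d (PySem.Int.floordiv k d) = [] := by
  have h : PySem.Int.floordiv k d < d := (PySem.Int.floordiv_lt_iff_lt_mul (by omega)).2 hgt
  unfold pvDivsIn
  rw [PySem.List.pyRange_one_eq_nil (by omega)]
  rfl

theorem pv_divsIn_base_eq (k d : Int) (hd : 1 ≤ d) (heq : d * d = k) :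
    pvDivsIn k d (PySem.Int.floordiv k d) = [d] := by
  have h : PySem.Int.floordiv k d = d :=
    (PySem.Int.floordiv_eq_iff_of_pos (by omega)).2 (by constructor <;> nlinarith)
  unfold pvDivsIn
  rw [h]
  apply pv_filter_pyRange_singleton _ _ _ _ (le_refl d) (by omega)
  · simp [(PySem.Int.mod_eq_zero_iff_dvd k d).2 ⟨d, heq.symm⟩]
  · intro e h1 h2 _; omega

theorem pv_divsIn_step (k d : Int) (hd : 1 ≤ d) (hlt : d * d < k) :
    pvDivsIn k d (PySem.Int.floordiv k d) =
      (if PySem.Int.mod k d == 0 then [d] else []) ++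
        pvDivsIn k (d + 1) (PySem.Int.floordiv k (d + 1)) ++
        (if PySem.Int.mod k d == 0 then [PySem.Int.floordiv k d] else []) := by
  set H := PySem.Int.floordiv k d with hH
  set H' := PySem.Int.floordiv k (d + 1) with hH'
  have hdH : d ≤ H := (PySem.Int.le_floordiv_iff_mul_le (by omega)).2 (by omega)
  have hH'0 : 0 ≤ H' := (PySem.Int.le_floordiv_iff_mul_le (by omega)).2 (by nlinarith)
  have hH'self : H' * (d + 1) ≤ k := (PySem.Int.le_floordiv_iff_mul_le (by omega)).1 (le_refl H')
  have hH'H : H' ≤ H := (PySem.Int.le_floordiv_iff_mul_le (by omega)).2 (by nlinarith)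
  by_cases hdvd : PySem.Int.mod k d = 0
  · obtain ⟨m, hm⟩ := (PySem.Int.mod_eq_zero_iff_dvd k d).1 hdvd
    have hHm : H = m := (PySem.Int.floordiv_eq_iff_of_pos (by omega)).2 (by constructor <;> nlinarith)
    have hdm : d < m := by nlinarith
    have hdH' : d ≤ H' := (PySem.Int.le_floordiv_iff_mul_le (by omega)).2 (by nlinarith)
    have hH'm : H' < m := by
      have := (PySem.Int.floordiv_lt_iff_lt_mul (b := d+1) (a := k) (q := m) (by omega)).2 (by nlinarith)
      omega
    simp only [hdvd, beq_self_eq_true, if_true]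
    unfold pvDivsIn
    rw [PySem.List.pyRange_one_append d (H' + 1) (H + 1) (by omega) (by omega),
        PySem.List.pyRange_one_cons (show d < H' + 1 by omega), List.filter_append,
        List.filter_cons_of_pos (by simp [hdvd])]
    rw [pv_filter_pyRange_singleton _ (H' + 1) (H + 1) H (by omega) (by omega)
      (by
        simp only [beq_iff_eq, PySem.Int.mod_eq_zero_iff_dvd]
        exact ⟨d, by rw [hHm]; linarith [hm]⟩)
      (by
        intro e h1 h2 hpe
        obtain ⟨c, hc⟩ := (PySem.Int.mod_eq_zero_iff_dvd k e).1 (by simpa using hpe)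
        have he0 : 0 < e := by omega
        have hed : e * d ≤ k := (PySem.Int.le_floordiv_iff_mul_le (by omega)).1 (by omega)
        have hek : k < e * (d + 1) := by
          by_contra hcon
          have : e ≤ H' := (PySem.Int.le_floordiv_iff_mul_le (by omega)).2 (by omega)
          omega
        have hcd : c = d := by nlinarith
        have : e * d = m * d := by rw [← hcd]; nlinarith [hm, hc]
        have : e = m := by
          have hd0 : (d : Int) ≠ 0 := by omega
          exact mul_right_cancel₀ hd0 this
        omega)]
    simp [hHm]
  · have hpd : (PySem.Int.mod k d == 0) = false := by simpa using hdvd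
    simp only [hpd]
    unfold pvDivsIn
    rw [PySem.List.pyRange_one_cons (show d < H + 1 by omega),
        List.filter_cons_of_neg (by simp [hpd])]
    by_cases hcase : d ≤ H'
    · rw [PySem.List.pyRange_one_append (d + 1) (H' + 1) (H + 1) (by omega) (by omega),
          List.filter_append,
          pv_filter_pyRange_nil _ (H' + 1) (H + 1) (fun e h1 h2 => by
            simp only [beq_eq_false_iff_ne, ne_eq]
            intro hmod0
            obtain ⟨c, hc⟩ := (PySem.Int.mod_eq_zero_iff_dvd k e).1 hmod0
            have he0 : 0 < e := by omega
            have hed : e * d ≤ k := (PySem.Int.le_floordiv_iff_mul_le (by omega)).1 (by omega)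
            have hek : k < e * (d + 1) := by
              by_contra hcon
              have : e ≤ H' := (PySem.Int.le_floordiv_iff_mul_le (by omega)).2 (by omega)
              omega
            have hcd : c = d := by nlinarith
            exact hdvd ((PySem.Int.mod_eq_zero_iff_dvd k d).2 ⟨e, by rw [hc, hcd, mul_comm]⟩)),
          List.append_nil]
      simp
    · have hHd : H ≤ d := by
        have hklt : k < (d + 1) * d := by
          by_contra hcon
          exact hcase ((PySem.Int.le_floordiv_iff_mul_le (by omega)).2 (by nlinarith))
        have := (PySem.Int.floordiv_lt_iff_lt_mul (b := d) (a := k) (q := d + 1) (by omega)).2 hklt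
        omega
      rw [show H = d by omega]
      rw [PySem.List.pyRange_one_eq_nil (show d + 1 ≤ d + 1 by omega),
          PySem.List.pyRange_one_eq_nil (show H' + 1 ≤ d + 1 by omega)]
      simp

def pvF (k : Int) (t : Int × List Int × List Int) : List Int :=
  (if t.1 * t.1 == k then t.2.1 ++ [t.1] else t.2.1) ++ t.2.2.reverse

theorem pv_collect_spec (k d : Int) (hd : 1 ≤ d) (small large : List Int) :
    pvF k (collectDivs k d small large) =
      small ++ pvDivsIn k d (PySem.Int.floordiv k d) ++ large.reverse := by
  rw [collectDivs]
  by_cases h : d * d < k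
  · rw [dif_pos h]
    by_cases hdvd : PySem.Int.mod k d = 0
    · rw [if_pos (by simp [hdvd])]
      rw [pv_collect_spec k (d + 1) (by omega)]
      rw [pv_divsIn_step k d hd h]
      simp [hdvd]
    · rw [if_neg (by simp [hdvd])]
      rw [pv_collect_spec k (d + 1) (by omega)]
      rw [pv_divsIn_step k d hd h]
      simp [hdvd]
  · rw [dif_neg h]
    by_cases heq : d * d = k
    · rw [pv_divsIn_base_eq k d hd heq]
      simp [pvF, heq]
    · rw [pv_divsIn_base_gt k d hd (by omega)]
      simp [pvF, heq]
termination_by (k - d).toNat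
decreasing_by all_goals (have := pv_le_mul_self d; omega)

def pvP (k : Int) : List Int := (PySem.List.pyRange 1 k 1).filter (fun i => PySem.Int.mod k i == 0)

theorem pv_divs_eq (k : Int) :
    ((pvF k (collectDivs k 1 [] [])).filter (fun v => v ≠ k)) = pvP k := by
  by_cases hk : 1 ≤ k
  · rw [pv_collect_spec k 1 (le_refl 1)]
    have h1 : PySem.Int.floordiv k 1 = k := (PySem.Int.floordiv_eq_iff_of_pos (by omega)).2 (by omega)
    rw [h1]
    unfold pvDivsIn pvP
    have hkk : (PySem.Int.mod k k == 0) = true := by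
      simp [PySem.Int.mod_eq_zero_iff_dvd]
    have hfk : List.filter (fun i => PySem.Int.mod k i == 0) [k] = [k] := by
      simp [hkk]
    have h2 : List.filter (fun v => decide (v ≠ k)) [k] = [] := by simp
    simp only [List.nil_append, List.reverse_nil, List.append_nil]
    rw [PySem.List.pyRange_one_succ_right hk, List.filter_append, hfk, List.filter_append,
        h2, List.append_nil]
    rw [List.filter_eq_self.2 ?_]
    intro a ha
    have := List.mem_filter.1 ha
    have := (PySem.List.mem_pyRange_one).1 this.1
    simp; omega
  · rw [collectDivs]
    rw [dif_neg (by nlinarith)]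
    unfold pvF pvP
    rw [PySem.List.pyRange_one_eq_nil (by omega)]
    simp

def pvSep : List Char := [' ', '+', ' ']

def pvTerms (x D : List Int) : List (List Char) :=
  ((x.zip D).filter (fun p => p.1 ≠ 0)).map
    (fun p => PySem.Int.toChars p.1 ++ ['*'] ++ PySem.Int.toChars p.2)

theorem pv_propdiv_eq (k : Int) : proper_divisors k = pvP k := by
  unfold proper_divisors pvP
  rw [PySem.List.foldl_append_if_eq_filter (fun i => divides i k)]
  simp only [List.nil_append]
  rfl

theorem pv_zipIdx (f : Int → Int → List Char) :
    ∀ (D x : List Int), D.length ≤ x.length →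
      (List.range D.length).flatMap
          (fun i => if x.getD i 0 ≠ 0 then f (x.getD i 0) (D.getD i 0) else [])
        = ((x.zip D).filter (fun p => p.1 ≠ 0)).flatMap (fun p => f p.1 p.2) := by
  intro D
  induction D with
  | nil => intro x _; simp
  | cons d D ih =>
    intro x hx
    cases x with
    | nil => simp at hx
    | cons a x =>
      rw [List.length_cons, List.range_succ_eq_map]
      rw [List.flatMap_cons, List.flatMap_map]
      simp only [List.getD_cons_zero, Nat.succ_eq_add_one, List.getD_cons_succ]
      rw [ih x (by simpa using hx)]
      by_cases ha : a ≠ 0 <;> simp [ha]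

theorem pv_flatMap_sep : ∀ (ts : List (List Char)), ts ≠ [] →
    ts.flatMap (· ++ pvSep) = List.intercalate pvSep ts ++ pvSep := by
  intro ts
  induction ts with
  | nil => intro h; exact absurd rfl h
  | cons t ts ih =>
    intro _
    cases ts with
    | nil => simp [List.intercalate]
    | cons u ts =>
      rw [List.flatMap_cons, ih (by simp)]
      have : List.intercalate pvSep (t :: u :: ts) = t ++ pvSep ++ List.intercalate pvSep (u :: ts) := by
        simp [List.intercalate, List.intersperse]
      rw [this]
      simp

theorem pv_strip (ts : List (List Char)) :
    PySem.List.slice (ts.flatMap (· ++ pvSep)) (some 0)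
        (some (PySem.List.len (ts.flatMap (· ++ pvSep)) - 3))
      = List.intercalate pvSep ts := by
  cases ts with
  | nil =>
    simp only [List.flatMap_nil]
    rw [PySem.List.slice_zero_start]
    have : (PySem.List.len ([] : List Char) - 3) = -3 := by simp [PySem.List.len_eq]
    rw [this]
    rw [PySem.List.slice_to_neg_ofNat ([] : List Char) 3 (by omega)]
    simp [List.intercalate]
  | cons t ts =>
    rw [pv_flatMap_sep (t :: ts) (by simp)]
    rw [PySem.List.slice_zero_start]
    set J := List.intercalate pvSep (t :: ts) with hJ
    have hlen : PySem.List.len (J ++ pvSep) - 3 = (J.length : Int) := by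
      simp [PySem.List.len_eq, pvSep]
    rw [hlen, PySem.List.slice_to _ (by positivity)]
    simp

theorem pvSqrtAux_spec : ∀ (fuel : Nat) (k lo hi : Int), 1 ≤ lo → lo * lo ≤ k → k < hi * hi →
    lo < hi → hi - lo ≤ 2 ^ fuel →
    1 ≤ pvSqrtAux fuel k lo hi ∧ pvSqrtAux fuel k lo hi * pvSqrtAux fuel k lo hi ≤ k ∧
      k < (pvSqrtAux fuel k lo hi + 1) * (pvSqrtAux fuel k lo hi + 1) := by
  intro fuel
  induction fuel with
  | zero =>
    intro k lo hi h1 hlo hhi hlt hfuel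
    have : hi = lo + 1 := by omega
    subst this
    exact ⟨h1, hlo, by simpa using hhi⟩
  | succ fuel ih =>
    intro k lo hi h1 hlo hhi hlt hfuel
    rw [pvSqrtAux]
    by_cases hsmall : hi ≤ lo + 1
    · rw [if_pos hsmall]
      have : hi = lo + 1 := by omega
      subst this
      exact ⟨h1, hlo, by simpa using hhi⟩
    · rw [if_neg hsmall]
      have hm1 : lo ≤ PySem.Int.floordiv (lo + hi) 2 :=
        (PySem.Int.le_floordiv_iff_mul_le (by omega)).2 (by omega)
      have hm2 : PySem.Int.floordiv (lo + hi) 2 < hi :=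
        (PySem.Int.floordiv_lt_iff_lt_mul (by omega)).2 (by omega)
      have hm1' : lo + 1 ≤ PySem.Int.floordiv (lo + hi) 2 :=
        (PySem.Int.le_floordiv_iff_mul_le (by omega)).2 (by omega)
      have hm2' : PySem.Int.floordiv (lo + hi) 2 ≤ hi - 1 := by omega
      have hself : PySem.Int.floordiv (lo + hi) 2 * 2 ≤ lo + hi :=
        (PySem.Int.le_floordiv_iff_mul_le (by omega)).1 (le_refl _)
      have hself2 : lo + hi < (PySem.Int.floordiv (lo + hi) 2 + 1) * 2 := by
        by_contra hcon
        have := (PySem.Int.le_floordiv_iff_mul_le (a := lo + hi) (b := 2)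
          (q := PySem.Int.floordiv (lo + hi) 2 + 1) (by omega)).2 (by omega)
        omega
      have hpow : (2:Int) ^ (fuel + 1) = 2 ^ fuel * 2 := by ring
      rw [hpow] at hfuel
      set m := PySem.Int.floordiv (lo + hi) 2 with hm
      dsimp only
      by_cases hcase : m * m ≤ k
      · rw [if_pos hcase]
        exact ih k m hi (by omega) hcase hhi (by omega) (by omega)
      · rw [if_neg hcase]
        exact ih k lo m h1 hlo (by omega) (by omega) (by omega)

theorem pv_sqrt_facts (k : Int) (hk : 1 ≤ k) (hbd : k ≤ 2147483648) :
    pvSqrt k * pvSqrt k ≤ k ∧ k < (pvSqrt k + 1) * (pvSqrt k + 1) ∧ 1 ≤ pvSqrt k := by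
  unfold pvSqrt
  rw [if_neg (by omega)]
  obtain ⟨h1, h2, h3⟩ := pvSqrtAux_spec 64 k 1 (k + 1) (le_refl 1) (by omega) (by nlinarith)
    (by omega) (by norm_num; omega)
  exact ⟨h2, h3, h1⟩

theorem pv_len_divsIn (k : Int) (hk : 1 ≤ k) (hbd : k ≤ 2147483648) (d : Int) (hd : 1 ≤ d) :
    ((pvDivsIn k d (PySem.Int.floordiv k d)).length : Int)
      = 2 * ((PySem.List.pyRange d (pvSqrt k + 1) 1).countP
              (fun e => decide (e * e < k) && (PySem.Int.mod k e == 0)) : Int)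
        + (if pvSqrt k * pvSqrt k = k ∧ d ≤ pvSqrt k then 1 else 0) := by
  obtain ⟨hs1, hs2, hs3⟩ := pv_sqrt_facts k hk hbd
  set s := pvSqrt k with hs
  by_cases h : d * d < k
  · have hds : d < s + 1 := by nlinarith
    have IH := pv_len_divsIn k hk hbd (d + 1) (by omega)
    rw [← hs] at IH
    rw [pv_divsIn_step k d hd h, PySem.List.pyRange_one_cons hds, List.countP_cons]
    have hss : (s * s = k ∧ d ≤ s) ↔ (s * s = k ∧ d + 1 ≤ s) := by
      constructor
      · rintro ⟨h1, _⟩; exact ⟨h1, by nlinarith⟩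
      · rintro ⟨h1, h2⟩; exact ⟨h1, by omega⟩
    rw [if_congr hss rfl rfl]
    by_cases hdvd : PySem.Int.mod k d = 0
    · simp only [hdvd, beq_self_eq_true, if_true, decide_eq_true_eq, h, Bool.and_true,
        List.length_append, List.length_cons, List.length_nil]
      push_cast
      linarith [IH]
    · have hb : (PySem.Int.mod k d == 0) = false := by simpa using hdvd
      simp only [hb, Bool.false_eq_true, if_false, Bool.and_false,
        List.nil_append, List.append_nil]
      push_cast
      linarith [IH]
  · by_cases heq : d * d = k
    · have hds : d = s := by
        have h1 : s ≤ d := by nlinarith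
        have h2 : d < s + 1 := by nlinarith
        omega
      rw [pv_divsIn_base_eq k d hd heq]
      rw [hds] at heq ⊢
      rw [show PySem.List.pyRange s (s + 1) 1 = [s] from PySem.List.pyRange_one_singleton s]
      simp [heq]
    · have hgt : k < d * d := by omega
      have hds : s < d := by nlinarith
      rw [pv_divsIn_base_gt k d hd hgt,
          PySem.List.pyRange_one_eq_nil (show s + 1 ≤ d by omega)]
      simp [show ¬(s * s = k ∧ d ≤ s) from fun hcon => by omega]
termination_by (k - d).toNat
decreasing_by all_goals (have := pv_le_mul_self d; omega)

theorem pv_divsIn_one (k : Int) (hk : 1 ≤ k) :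
    pvDivsIn k 1 (PySem.Int.floordiv k 1) = pvP k ++ [k] := by
  have h1 : PySem.Int.floordiv k 1 = k := (PySem.Int.floordiv_eq_iff_of_pos (by omega)).2 (by omega)
  rw [h1]
  unfold pvDivsIn pvP
  rw [PySem.List.pyRange_one_succ_right hk, List.filter_append]
  have hkk : (PySem.Int.mod k k == 0) = true := by
    simp [PySem.Int.mod_eq_zero_iff_dvd]
  simp [hkk]

theorem pv_B_count (k : Int) (hk : 1 ≤ k) (hbd : k ≤ 2147483648) :
    ((PySem.List.pyRange 1 (pvSqrt k + 1) 1).countP (fun e => PySem.Int.mod k e == 0) : Int)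
      = ((PySem.List.pyRange 1 (pvSqrt k + 1) 1).countP
          (fun e => decide (e * e < k) && (PySem.Int.mod k e == 0)) : Int)
        + (if pvSqrt k * pvSqrt k = k then 1 else 0) := by
  obtain ⟨hs1, hs2, hs3⟩ := pv_sqrt_facts k hk hbd
  set s := pvSqrt k with hs
  rw [PySem.List.pyRange_one_succ_right (by omega : (1:Int) ≤ s)]
  rw [List.countP_append, List.countP_append]
  have hcong : (PySem.List.pyRange 1 s 1).countP (fun e => PySem.Int.mod k e == 0)
      = (PySem.List.pyRange 1 s 1).countP (fun e => decide (e * e < k) && (PySem.Int.mod k e == 0)) := by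
    apply List.countP_congr
    intro e he
    have := PySem.List.mem_pyRange_one.1 he
    have helt : e * e < k := by nlinarith
    simp [helt]
  rw [hcong]
  by_cases hsq : s * s = k
  · have hdvd : (PySem.Int.mod k s == 0) = true := by
      simp [PySem.Int.mod_eq_zero_iff_dvd]
      exact ⟨s, hsq.symm⟩
    have hnlt : (decide (s * s < k)) = false := by simp [hsq]
    simp [hdvd, hsq]
  · have hlt : s * s < k := by omega
    simp only [List.countP_cons, List.countP_nil, if_neg hsq]
    simp [hlt]

theorem pv_count_eq (k : Int) (hbd : k ≤ 2147483648) : pvNumProper k = ((pvP k).length : Int) := by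
  by_cases hk : k < 1
  · unfold pvNumProper pvP
    rw [if_pos hk, PySem.List.pyRange_one_eq_nil (by omega)]
    simp
  · have hk1 : 1 ≤ k := by omega
    obtain ⟨hs1, hs2, hs3⟩ := pv_sqrt_facts k hk1 hbd
    have hlen : ((pvDivsIn k 1 (PySem.Int.floordiv k 1)).length : Int) = (pvP k).length + 1 := by
      rw [pv_divsIn_one k hk1]
      simp
    have hmain := pv_len_divsIn k hk1 hbd 1 (le_refl 1)
    have hB := pv_B_count k hk1 hbd
    unfold pvNumProper
    rw [if_neg hk]
    rw [hB]
    have hone : (if pvSqrt k * pvSqrt k = k ∧ (1:Int) ≤ pvSqrt k then (1:Int) else 0)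
        = (if pvSqrt k * pvSqrt k = k then (1:Int) else 0) := by
      split_ifs with h1 h2 h2 <;> first | rfl | (exact absurd ⟨h2, hs3⟩ h1) | (exact absurd h1.1 h2)
    rw [hone] at hmain
    rw [hlen] at hmain
    split_ifs at hmain ⊢ <;> linarith [hmain]


theorem pv_A_eq (k : Int) (x : List Int) (hx : (pvP k).length ≤ x.length) :
    vector_as_sum k x = String.ofList (List.intercalate pvSep (pvTerms x (pvP k))) := by
  unfold vector_as_sum
  dsimp only
  rw [pv_propdiv_eq]
  rw [PySem.List.len_eq, PySem.List.pyRange_zero_natCast, List.foldl_map]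
  simp only [PySem.List.pyGetD_natCast]
  rw [PySem.List.foldl_congr_mem _ _
    (fun s i => s ++ (if x.getD i 0 ≠ 0 then
      (PySem.Int.toChars (x.getD i 0) ++ ['*'] ++ PySem.Int.toChars ((pvP k).getD i 0)) ++ pvSep
      else [])) _
    (by
      intro acc i _
      simp only [List.getD_eq_getElem?_getD]
      by_cases ha : (x[i]?).getD 0 = 0
      · simp [ha]
      · simp [ha, pvSep])]
  rw [PySem.List.foldl_append_eq_flatMap]
  rw [List.nil_append]
  rw [pv_zipIdx (fun a b => (PySem.Int.toChars a ++ ['*'] ++ PySem.Int.toChars b) ++ pvSep)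
      (pvP k) x hx]
  rw [← List.flatMap_map (fun p : Int × Int => PySem.Int.toChars p.1 ++ ['*'] ++ PySem.Int.toChars p.2)
      (fun t => t ++ pvSep)]
  rw [show ((x.zip (pvP k)).filter (fun p => p.1 ≠ 0)).map
      (fun p => PySem.Int.toChars p.1 ++ ['*'] ++ PySem.Int.toChars p.2) = pvTerms x (pvP k) from rfl]
  rw [pv_strip]

theorem pv_B_eq (k : Int) (x : List Int) :
    vector_as_sum_alt k x = String.ofList (List.intercalate pvSep (pvTerms x (pvP k))) := by
  have h := pv_divs_eq k
  unfold pvF at h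
  unfold vector_as_sum_alt
  dsimp only
  rw [h]
  rfl

-- ===== VERDICT (by name: the statement is the Claim_ definition above) =====
theorem vector_as_sum_spec : Claim_equal_vector_as_sum := by
  intro k x hdom hpre
  have hbd : k ≤ 2147483648 := by
    unfold Dom_vector_as_sum pvDomInt at hdom
    simp only [Bool.and_eq_true, decide_eq_true_eq] at hdom
    exact hdom.1.2
  unfold Pre_vector_as_sum at hpre
  rw [pv_count_eq k hbd] at hpre
  unfold Spec_vector_as_sum
  rw [pv_A_eq k x (by exact_mod_cast hpre), pv_B_eq k x]
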